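-- pv_equiv track=rewrite | github.com/TravisChamness1994/COMP469_Lab2_BFS | Lab2BFS.py | positionInitialization
-- ===== SOURCE A (Python) =====
-- def positionInitialization(bfsmap):
--     start = [0,0]
--     goal = [0,0]
--
--     for row in range(len(bfsmap)):
--         for col in range(len(bfsmap[row])):
--             if bfsmap[row][col] == 'R':
--                 start = [row,col]
--             if bfsmap[row][col] == 'D':
--                 goal = [row,col]
--     return start, goal
-- ===== SOURCE B (Python) =====
-- def positionInitialization(bfsmap):
--     def find_last(target):
--         # search back-to-front and stop at the first hit = last occurrence
--         for r, row in reversed(list(enumerate(bfsmap))):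
--             for c, v in reversed(list(enumerate(row))):
--                 if v == target:
--                     return [r, c]
--         return [0, 0]
--     return find_last('R'), find_last('D')
-- ===== Notes on version B (the rewrite author's own statement) =====
-- stated objective: alternative
-- what changed: Replaces the exhaustive forward scan with running overwrite of two accumulators by two early-exiting back-to-front searches: each marker is found by traversing the grid in reverse and returning at the first hit, so no state is carried and the scan stops as soon as the marker is seen.
import Mathlib
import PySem

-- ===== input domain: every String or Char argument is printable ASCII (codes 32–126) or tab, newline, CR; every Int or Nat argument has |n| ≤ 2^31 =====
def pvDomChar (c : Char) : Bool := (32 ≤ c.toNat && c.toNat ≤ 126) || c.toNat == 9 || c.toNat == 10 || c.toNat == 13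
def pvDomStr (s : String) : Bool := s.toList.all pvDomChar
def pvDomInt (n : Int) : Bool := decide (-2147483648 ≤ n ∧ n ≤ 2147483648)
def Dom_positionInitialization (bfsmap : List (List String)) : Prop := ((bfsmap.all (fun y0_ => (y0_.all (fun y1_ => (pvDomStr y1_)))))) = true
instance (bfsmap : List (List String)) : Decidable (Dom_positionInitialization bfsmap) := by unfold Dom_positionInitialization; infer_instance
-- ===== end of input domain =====

-- B replaces the exhaustive forward scan with overwrite by two early-exiting back-to-front
-- searches (first hit of the reversed traversal = last occurrence): alternative decomposition.

-- ===== PORT A =====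
def positionInitialization (bfsmap : List (List String)) : List Int × List Int :=
  let start : List Int := [0, 0]
  let goal : List Int := [0, 0]
  (PySem.List.pyRange 0 (bfsmap.length : Int) 1).foldl (fun sg row =>
    let r := PySem.List.pyGetD bfsmap row []
    (PySem.List.pyRange 0 (r.length : Int) 1).foldl (fun sg col =>
      let sg := if PySem.List.pyGetD r col "" == "R" then ([row, col], sg.2) else sg
      if PySem.List.pyGetD r col "" == "D" then (sg.1, [row, col]) else sg) sg)
    (start, goal)

-- ===== PORT B =====
-- early-exiting backward search: first match of the reversed enumeration, else [0,0]
def piFindLast (bfsmap : List (List String)) (t : String) : List Int :=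
  (((PySem.List.enumerate bfsmap).reverse).findSome? (fun rp =>
    ((PySem.List.enumerate rp.2).reverse).findSome? (fun cp =>
      if cp.2 == t then some [rp.1, cp.1] else none))).getD [0, 0]

def positionInitialization_alt (bfsmap : List (List String)) : List Int × List Int :=
  (piFindLast bfsmap "R", piFindLast bfsmap "D")

-- ===== PRECONDITION & SPEC =====
def Spec_positionInitialization (bfsmap : List (List String)) (out : List Int × List Int) : Prop := out = positionInitialization_alt bfsmap
instance (bfsmap : List (List String)) (out : List Int × List Int) : Decidable (Spec_positionInitialization bfsmap out) := by unfold Spec_positionInitialization; infer_instance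

-- ===== CLAIM (what is proved, stated in full; the proofs are below) =====
def Claim_equal_positionInitialization : Prop := ∀ (bfsmap : List (List String)), Dom_positionInitialization bfsmap → Spec_positionInitialization bfsmap (positionInitialization bfsmap)

-- ===== LEMMAS AND PROOFS =====

-- overwrite loop = last collected match (or the default)
theorem foldl_overwrite_eq_getLastD {α β : Type} (l : List α) (f : α → Option β) (init : β) :
    l.foldl (fun s a => (f a).getD s) init = (l.filterMap f).getLastD init := by
  induction l generalizing init with
  | nil => rfl
  | cons x xs ih =>
    rw [List.foldl_cons, List.filterMap_cons]
    cases h : f x with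
    | none => rw [Option.getD_none, ih]
    | some b => rw [Option.getD_some, ih, List.getLastD_cons]

-- last collected match = first match of the reversed list
theorem getLastD_filterMap_eq_findSome?_reverse {α β : Type} (l : List α) (f : α → Option β) (d : β) :
    (l.filterMap f).getLastD d = (l.reverse.findSome? f).getD d := by
  rw [List.getLastD_eq_getLast?, List.getLast?_eq_head?_reverse, ← List.filterMap_reverse,
    List.head?_filterMap]

-- findSome? distributes over flatMap
theorem findSome?_flatMap {α β γ : Type} (l : List α) (g : α → List β) (f : β → Option γ) :
    (l.flatMap g).findSome? f = l.findSome? (fun a => (g a).findSome? f) := by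
  induction l with
  | nil => rfl
  | cons x xs ih =>
    rw [List.flatMap_cons, List.findSome?_append, List.findSome?_cons]
    cases h : (g x).findSome? f with
    | none => simpa [h] using ih
    | some c => simp [h]

theorem positionInitialization_spec : Claim_equal_positionInitialization := by
  intro bfsmap _
  show positionInitialization bfsmap = positionInitialization_alt bfsmap
  have hA : ((PySem.List.enumerate bfsmap).flatMap (fun rp =>
        (PySem.List.enumerate rp.2).map (fun cp => ((rp.1, cp.1, cp.2) : Int × Int × String)))).foldl
      (fun sg c =>
        ((if c.2.2 == "R" then some [c.1, c.2.1] else none).getD sg.1,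
         (if c.2.2 == "D" then some [c.1, c.2.1] else none).getD sg.2)) ([0,0], [0,0])
      = positionInitialization bfsmap := by
    simp only [positionInitialization]
    rw [List.foldl_flatMap, PySem.List.enumerate_eq_map_pyRange bfsmap ([] : List String),
        List.foldl_map]
    simp only [PySem.List.len_eq]
    refine PySem.List.foldl_congr_mem _ _ _ _ ?_
    intro acc row _
    rw [List.foldl_map, PySem.List.enumerate_eq_map_pyRange _ ("" : String), List.foldl_map]
    simp only [PySem.List.len_eq]
    refine PySem.List.foldl_congr_mem _ _ _ _ ?_
    intro sg col _
    by_cases hR : PySem.List.pyGetD (PySem.List.pyGetD bfsmap row []) col "" == "R" <;>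
      by_cases hD : PySem.List.pyGetD (PySem.List.pyGetD bfsmap row []) col "" == "D" <;>
      simp_all
  rw [← hA, PySem.List.foldl_prod_mk
      (f := fun s (c : Int × Int × String) => (if c.2.2 == "R" then some [c.1, c.2.1] else none).getD s)
      (g := fun s (c : Int × Int × String) => (if c.2.2 == "D" then some [c.1, c.2.1] else none).getD s),
    foldl_overwrite_eq_getLastD, foldl_overwrite_eq_getLastD,
    getLastD_filterMap_eq_findSome?_reverse, getLastD_filterMap_eq_findSome?_reverse]
  have hM : ∀ t : String,
      (((PySem.List.enumerate bfsmap).flatMap (fun rp =>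
        (PySem.List.enumerate rp.2).map (fun cp => ((rp.1, cp.1, cp.2) : Int × Int × String)))).reverse.findSome?
        (fun c => if c.2.2 == t then some [c.1, c.2.1] else none)).getD [0,0]
      = piFindLast bfsmap t := by
    intro t
    rw [List.reverse_flatMap, findSome?_flatMap]
    simp only [piFindLast, ← List.map_reverse, List.findSome?_map, Function.comp_def]
  rw [hM, hM]
  rfl
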